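-- pv_equiv track=rewrite | github.com/jerrylususu/advent-of-code-2024 | pysrc/day4p1.py | traverse_diag1
-- ===== SOURCE A (Python) =====
-- def pos_in_grid(grid, x, y):
--     if x < 0 or x >= len(grid) or y < 0 or y >= len(grid[0]):
--         return False
--     return True
--
-- def traverse_diag1(grid):
--     results = []
--     n_rows = len(grid)
--     n_cols = len(grid[0])
--
--     left_and_up_edge_pos_list = []
--     for i in range(n_rows - 1, 0, -1):
--         left_and_up_edge_pos_list.append((i,0))
--     for i in range(n_cols):
--         left_and_up_edge_pos_list.append((0,i))
--
--     for initial_pos in left_and_up_edge_pos_list: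
--         pos = initial_pos
--         collected = []
--         while pos_in_grid(grid, pos[0], pos[1]):
--             collected.append(grid[pos[0]][pos[1]])
--             pos = (pos[0] + 1, pos[1] + 1)
--         results.append(collected)
--
--     return results
-- ===== SOURCE B (Python) =====
-- def traverse_diag1(grid):
--     n_rows = len(grid)
--     n_cols = len(grid[0])
--     diags = {}
--     for i in range(n_rows):
--         for j in range(n_cols):
--             diags.setdefault(i - j, []).append(grid[i][j])
--     return [diags.get(d, []) for d in range(n_rows - 1, -n_cols, -1)]
-- ===== Notes on version B (the rewrite author's own statement) =====
-- stated objective: alternative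
-- what changed: Instead of walking each diagonal cell-by-cell from precomputed left/top edge starting points with a per-cell bounds check, B makes one row-major pass bucketing each cell by its diagonal key i-j in a dict and then emits the buckets for keys n_rows-1 down to -n_cols+1.
import Mathlib
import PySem

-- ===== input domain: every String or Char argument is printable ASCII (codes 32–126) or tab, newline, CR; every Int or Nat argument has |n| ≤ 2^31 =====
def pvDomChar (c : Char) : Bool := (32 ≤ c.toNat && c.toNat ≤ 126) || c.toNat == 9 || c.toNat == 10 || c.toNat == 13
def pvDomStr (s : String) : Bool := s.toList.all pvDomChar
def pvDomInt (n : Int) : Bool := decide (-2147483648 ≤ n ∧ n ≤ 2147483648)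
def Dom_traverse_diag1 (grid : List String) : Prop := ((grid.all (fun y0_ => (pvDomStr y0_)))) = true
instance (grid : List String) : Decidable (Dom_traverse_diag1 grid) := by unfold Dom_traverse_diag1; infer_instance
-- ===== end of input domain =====

-- B replaces A's walk along each diagonal from edge starting points by one row-major pass
-- bucketing cells by their diagonal key i-j (objective: alternative decomposition, same cost).

-- grid[x][y] as a one-character string (Python's grid[i][j]); shared cell accessor of both ports
def pyCell (grid : List String) (x y : Int) : String :=
  ((PySem.Str.pyGet? ((PySem.List.pyGet? grid x).getD "") y).map (fun c => String.ofList [c])).getD ""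

-- ===== PORT A =====
def pos_in_grid (grid : List String) (x y : Int) : Bool :=
  if x < 0 ∨ (grid.length : Int) ≤ x ∨ y < 0 ∨ PySem.Str.len ((PySem.List.pyGet? grid 0).getD "") ≤ y then
    false
  else
    true

-- the 'while pos_in_grid' collection loop of A
def collectDiag (grid : List String) (x y : Int) : List String :=
  if h : pos_in_grid grid x y = true then
    pyCell grid x y :: collectDiag grid (x + 1) (y + 1)
  else
    []
termination_by ((grid.length : Int) - x).toNat
decreasing_by
  have h1 : ¬(x < 0 ∨ (grid.length : Int) ≤ x ∨ y < 0 ∨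
      PySem.Str.len ((PySem.List.pyGet? grid 0).getD "") ≤ y) := by
    intro hc
    rw [pos_in_grid, if_pos hc] at h
    exact Bool.false_ne_true h
  push_neg at h1
  omega

def traverse_diag1 (grid : List String) : List (List String) :=
  let n_rows : Int := grid.length
  let n_cols : Int := PySem.Str.len ((PySem.List.pyGet? grid 0).getD "")
  let left_and_up_edge_pos_list : List (Int × Int) :=
    (PySem.List.pyRange (n_rows - 1) 0 (-1)).map (fun i => (i, (0 : Int)))
      ++ (PySem.List.pyRange 0 n_cols 1).map (fun i => ((0 : Int), i))
  left_and_up_edge_pos_list.map (fun pos => collectDiag grid pos.1 pos.2)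

-- ===== PORT B =====
def traverse_diag1_alt (grid : List String) : List (List String) :=
  let n_rows : Int := grid.length
  let n_cols : Int := PySem.Str.len ((PySem.List.pyGet? grid 0).getD "")
  let diags : PySem.Dict Int (List String) :=
    (PySem.List.pyRange 0 n_rows 1).foldl (fun d i =>
      (PySem.List.pyRange 0 n_cols 1).foldl (fun d j =>
        d.modify (i - j) [] (fun l => l ++ [pyCell grid i j])) d)
      PySem.Dict.empty
  (PySem.List.pyRange (n_rows - 1) (-n_cols) (-1)).map (fun d => diags.getD d [])

-- ===== PRECONDITION & SPEC =====
-- Pre_ excludes exactly the inputs where the Python A raises IndexError: the empty grid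
-- (grid[0] fails) and grids with a row shorter than row 0 (grid[i][j] fails for some visited j).
def Pre_traverse_diag1 (grid : List String) : Prop :=
  grid ≠ [] ∧ ∀ s ∈ grid, PySem.Str.len ((PySem.List.pyGet? grid 0).getD "") ≤ PySem.Str.len s
instance (grid : List String) : Decidable (Pre_traverse_diag1 grid) := by
  unfold Pre_traverse_diag1; infer_instance

def pvWitness_traverse_diag1 : List String := ["abc", "def"]

def Spec_traverse_diag1 (grid : List String) (out : List (List String)) : Prop := out = traverse_diag1_alt grid
instance (grid : List String) (out : List (List String)) : Decidable (Spec_traverse_diag1 grid out) := by unfold Spec_traverse_diag1; infer_instance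

-- ===== CLAIM (what is proved, stated in full; the proofs are below) =====
def Claim_equal_traverse_diag1 : Prop := ∀ (grid : List String), Dom_traverse_diag1 grid → Pre_traverse_diag1 grid → Spec_traverse_diag1 grid (traverse_diag1 grid)

-- ===== LEMMAS AND PROOFS =====

-- number of columns read by both programs
def nColsI (grid : List String) : Int := PySem.Str.len ((PySem.List.pyGet? grid 0).getD "")

lemma nColsI_nonneg (grid : List String) : 0 ≤ nColsI grid := by
  simp [nColsI, PySem.Str.len_eq]

-- range(a, b, -1) as a mapped List.range
lemma pyRange_negone (a b : Int) :
    PySem.List.pyRange a b (-1) = (List.range (a - b).toNat).map (fun k : Nat => a - (k : Int)) := by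
  simp only [PySem.List.pyRange]
  norm_num
  split_ifs with h
  · exact List.map_congr_left (fun k _ => by push_cast; ring)
  · have h2 : (a - b).toNat = 0 := by omega
    simp [h2]

lemma range_filter_int (m : Nat) (c : Int) :
    (List.range m).filter (fun k : Nat => ((k : Int) == c)) =
      if 0 ≤ c ∧ c < (m : Int) then [c.toNat] else [] := by
  induction m with
  | zero =>
    rw [List.range_zero, List.filter_nil, if_neg (by omega)]
  | succ n ih =>
    rw [List.range_succ, List.filter_append, ih]
    by_cases hc : (n : Int) = c
    · have hfil : (List.filter (fun k : Nat => ((k : Int) == c)) [n]) = [n] := by simp [hc]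
      have hno : ¬(0 ≤ c ∧ c < (n : Int)) := by omega
      rw [hfil, if_neg hno, List.nil_append]
      rw [if_pos (by push_cast; omega : 0 ≤ c ∧ c < ((n + 1 : Nat) : Int))]
      congr 1
      omega
    · have hfil : (List.filter (fun k : Nat => ((k : Int) == c)) [n]) = [] := by simp [hc]
      rw [hfil, List.append_nil]
      split_ifs with h1 h2 <;> try rfl
      · exfalso; push_cast at h2; omega
      · exfalso; push_cast at h1; omega

lemma filter_flatMap' {α β : Type} (l : List α) (f : α → List β) (p : β → Bool) :
    (l.flatMap f).filter p = l.flatMap (fun x => (f x).filter p) := by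
  induction l with
  | nil => simp
  | cons a t ih => simp [List.flatMap_cons, List.filter_append, ih]

lemma map_flatMap' {α β γ : Type} (l : List α) (f : α → List β) (g : β → γ) :
    (l.flatMap f).map g = l.flatMap (fun x => (f x).map g) := by
  induction l with
  | nil => simp
  | cons a t ih => simp [List.flatMap_cons, ih]

lemma foldl_flatMap' {α β γ : Type} (l : List α) (f : α → List β) (g : γ → β → γ) (init : γ) :
    (l.flatMap f).foldl g init = l.foldl (fun a x => (f x).foldl g a) init := by
  induction l generalizing init with
  | nil => simp
  | cons a t ih => simp [List.flatMap_cons, List.foldl_append, ih]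

-- collecting an interval out of a flatMap over row indices
lemma flatMap_range_if {α : Type} (n : Nat) (d nC : Int) (f : Int → α) :
    (List.range n).flatMap (fun i : Nat => if 0 ≤ (i : Int) - d ∧ (i : Int) - d < nC then [f (i : Int)] else [])
      = (List.range (min (n : Int) (d + nC) - max d 0).toNat).map (fun k : Nat => f (max d 0 + (k : Int))) := by
  induction n with
  | zero =>
    have h0 : (min (0 : Int) (d + nC) - max d 0).toNat = 0 := by omega
    simp [h0]
  | succ n ih =>
    rw [List.range_succ, List.flatMap_append, ih]
    simp only [List.flatMap_cons, List.flatMap_nil, List.append_nil]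
    by_cases hc : 0 ≤ (n : Int) - d ∧ (n : Int) - d < nC
    · have h1 : (min ((n + 1 : Nat) : Int) (d + nC) - max d 0).toNat
          = (min (n : Int) (d + nC) - max d 0).toNat + 1 := by
        push_cast; omega
      rw [h1, List.range_succ, List.map_append]
      rw [if_pos hc]
      simp only [List.map_cons, List.map_nil]
      have hT : max d 0 + (((min ((n : Int)) (d + nC) - max d 0).toNat : Nat) : Int) = (n : Int) := by
        omega
      rw [hT]
    · have h2 : (min ((n + 1 : Nat) : Int) (d + nC) - max d 0).toNat
          = (min (n : Int) (d + nC) - max d 0).toNat := by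
        push_cast; omega
      rw [if_neg hc, List.append_nil, h2]

-- characterization of A's while-loop walk
lemma collectDiag_eq_aux (grid : List String) (fuel : Nat) :
    ∀ (x y : Int), 0 ≤ x → 0 ≤ y → ((grid.length : Int) - x).toNat ≤ fuel →
      collectDiag grid x y =
        (List.range (min (grid.length : Int) (x + nColsI grid - y) - x).toNat).map
          (fun k : Nat => pyCell grid (x + (k : Int)) (y + (k : Int))) := by
  induction fuel with
  | zero =>
    intro x y hx hy hfuel
    have hxe : (grid.length : Int) ≤ x := by omega
    rw [collectDiag]
    have hpos : pos_in_grid grid x y = false := by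
      simp only [pos_in_grid]
      rw [if_pos]
      right; left; exact hxe
    rw [dif_neg (by simp [hpos])]
    have h0 : (min (grid.length : Int) (x + nColsI grid - y) - x).toNat = 0 := by omega
    simp [h0]
  | succ n ih =>
    intro x y hx hy hfuel
    rw [collectDiag]
    by_cases hin : x < (grid.length : Int) ∧ y < nColsI grid
    · have hpos : pos_in_grid grid x y = true := by
        simp only [pos_in_grid, nColsI] at *
        rw [if_neg]
        push_neg
        exact ⟨by omega, by omega, by omega, by omega⟩
      rw [dif_pos hpos]
      rw [ih (x + 1) (y + 1) (by omega) (by omega) (by omega)]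
      have hM : (min (grid.length : Int) (x + nColsI grid - y) - x).toNat
          = (min (grid.length : Int) ((x + 1) + nColsI grid - (y + 1)) - (x + 1)).toNat + 1 := by
        omega
      rw [hM, List.range_succ_eq_map, List.map_cons, List.map_map]
      refine List.cons_eq_cons.mpr ⟨?_, ?_⟩
      · norm_num
      · apply List.map_congr_left
        intro k _
        simp only [Function.comp]
        congr 1 <;> push_cast <;> ring
    · have hpos : pos_in_grid grid x y = false := by
        simp only [pos_in_grid, nColsI] at *
        rw [if_pos]
        omega
      rw [dif_neg (by simp [hpos])]
      have h0 : (min (grid.length : Int) (x + nColsI grid - y) - x).toNat = 0 := by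
        rcases not_and_or.mp hin with h | h <;> omega
      simp [h0]

lemma collectDiag_eq (grid : List String) (x y : Int) (hx : 0 ≤ x) (hy : 0 ≤ y) :
    collectDiag grid x y =
      (List.range (min (grid.length : Int) (x + nColsI grid - y) - x).toNat).map
        (fun k : Nat => pyCell grid (x + (k : Int)) (y + (k : Int))) :=
  collectDiag_eq_aux grid _ x y hx hy le_rfl

-- contribution of one row of B's pass to the bucket of diagonal d
lemma row_contrib (grid : List String) (nC i d : Int) :
    (((PySem.List.pyRange 0 nC 1).map (fun j => (i - j, pyCell grid i j))).filter
        (fun p => p.1 == d)).map (fun p => p.2)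
      = if 0 ≤ i - d ∧ i - d < nC then [pyCell grid i (i - d)] else [] := by
  rw [PySem.List.pyRange_one, List.map_map, List.filter_map, List.map_map]
  have hcg : ∀ k ∈ List.range (nC - 0).toNat,
      ((fun p => p.1 == d) ∘ (fun j => (i - j, pyCell grid i j)) ∘ (fun k : Nat => 0 + (k : Int))) k
        = ((k : Int) == i - d) := by
    intro k _
    simp only [Function.comp]
    rw [Bool.eq_iff_iff, beq_iff_eq, beq_iff_eq]
    omega
  rw [List.filter_congr hcg, range_filter_int]
  by_cases hc : 0 ≤ i - d ∧ i - d < nC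
  · have hc' : 0 ≤ i - d ∧ i - d < ((nC - 0).toNat : Int) := by omega
    rw [if_pos hc', if_pos hc]
    simp only [List.map_cons, List.map_nil, Function.comp]
    congr 2
    omega
  · have hc' : ¬(0 ≤ i - d ∧ i - d < ((nC - 0).toNat : Int)) := by omega
    rw [if_neg hc', if_neg hc]
    simp

-- the bucket dict built by B's row-major pass
def bDict (grid : List String) : PySem.Dict Int (List String) :=
  (PySem.List.pyRange 0 (grid.length : Int) 1).foldl (fun d i =>
    (PySem.List.pyRange 0 (nColsI grid) 1).foldl (fun d j =>
      d.modify (i - j) [] (fun l => l ++ [pyCell grid i j])) d)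
    PySem.Dict.empty

-- B's bucket for diagonal d equals A's walk of that diagonal from its edge start
lemma bucket_eq (grid : List String) (d : Int) :
    (bDict grid).getD d [] = collectDiag grid (max d 0) (max (-d) 0) := by
  have hstep : bDict grid =
      ((PySem.List.pyRange 0 (grid.length : Int) 1).flatMap
        (fun i => (PySem.List.pyRange 0 (nColsI grid) 1).map
          (fun j => (i - j, pyCell grid i j)))).foldl
        (fun d p => d.modify p.1 [] (fun l => l ++ [p.2])) PySem.Dict.empty := by
    rw [foldl_flatMap']
    unfold bDict
    apply PySem.List.foldl_congr_mem
    intro acc i _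
    rw [List.foldl_map]
  rw [hstep, PySem.Dict.getD_foldl_modify_append]
  rw [PySem.Dict.getD_empty, List.nil_append]
  rw [filter_flatMap', map_flatMap']
  have hrows : ∀ i ∈ PySem.List.pyRange 0 (grid.length : Int) 1,
      (fun i => (((PySem.List.pyRange 0 (nColsI grid) 1).map
          (fun j => (i - j, pyCell grid i j))).filter (fun p => p.1 == d)).map
            (fun p => p.2)) i
        = (fun i => if 0 ≤ i - d ∧ i - d < nColsI grid then [pyCell grid i (i - d)] else []) i := by
    intro i _
    exact row_contrib grid (nColsI grid) i d
  rw [List.flatMap_congr hrows]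
  rw [PySem.List.pyRange_one, List.flatMap_map]
  have hx : ((grid.length : Int) - 0).toNat = grid.length := by omega
  rw [hx]
  simp only [zero_add]
  rw [flatMap_range_if grid.length d (nColsI grid) (fun i => pyCell grid i (i - d))]
  rw [collectDiag_eq grid (max d 0) (max (-d) 0) (by omega) (by omega)]
  have harg1 : max d 0 + nColsI grid - max (-d) 0 = d + nColsI grid := by omega
  rw [harg1]
  apply List.map_congr_left
  intro k _
  congr 1
  omega

-- ===== VERDICT (by name: the statement is the Claim_ definition above) =====
theorem traverse_diag1_spec : Claim_equal_traverse_diag1 := by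
  intro grid _ hpre
  unfold Spec_traverse_diag1 traverse_diag1 traverse_diag1_alt
  have hne : grid ≠ [] := hpre.1
  have hnr : 1 ≤ (grid.length : Int) := by
    have : grid.length ≠ 0 := fun h => hne (List.eq_nil_of_length_eq_zero h)
    omega
  have hbd : ∀ d : Int,
      ((PySem.List.pyRange 0 (grid.length : Int) 1).foldl (fun d i =>
        (PySem.List.pyRange 0 (PySem.Str.len ((PySem.List.pyGet? grid 0).getD "")) 1).foldl
          (fun d j => d.modify (i - j) [] (fun l => l ++ [pyCell grid i j])) d)
        PySem.Dict.empty).getD d []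
      = collectDiag grid (max d 0) (max (-d) 0) := fun d => bucket_eq grid d
  simp only [List.map_append, List.map_map]
  simp only [hbd]
  have hnc : 0 ≤ PySem.Str.len ((PySem.List.pyGet? grid 0).getD "") := nColsI_nonneg grid
  rw [pyRange_negone ((grid.length : Int) - 1) 0,
      pyRange_negone ((grid.length : Int) - 1)
        (-(PySem.Str.len ((PySem.List.pyGet? grid 0).getD ""))),
      PySem.List.pyRange_one]
  have hsplit : ((grid.length : Int) - 1 - -(PySem.Str.len ((PySem.List.pyGet? grid 0).getD ""))).toNat
      = ((grid.length : Int) - 1 - 0).toNat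
        + (PySem.Str.len ((PySem.List.pyGet? grid 0).getD "") - 0).toNat := by
    omega
  rw [hsplit, List.range_add]
  simp only [List.map_append, List.map_map]
  congr 1
  · apply List.map_congr_left
    intro k hk
    rw [List.mem_range] at hk
    dsimp only [Function.comp]
    congr 1 <;> omega
  · apply List.map_congr_left
    intro k hk
    rw [List.mem_range] at hk
    dsimp only [Function.comp]
    congr 1 <;> omega
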